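-- pv_equiv track=rewrite | github.com/AdamZhouSE/pythonHomework | Code/CodeRecords/2639/60627/239215.py | f
-- ===== SOURCE A (Python) =====
-- def f(s,c):
--     t = 0
--     for i in range(len(s)):
--         if s[i] == c:
--             t += 1
--         else:
--             t = 0
--     return t
-- ===== SOURCE B (Python) =====
-- def f(s, c):
--     t = 0
--     for ch in reversed(s):
--         if ch == c:
--             t += 1
--         else:
--             break
--     return t
-- ===== Notes on version B (the rewrite author's own statement) =====
-- stated objective: faster
-- what changed: B scans the string backward and breaks at the first mismatch, reading off the trailing run directly, instead of A's full forward scan that resets a counter on every mismatch.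
import Mathlib
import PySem

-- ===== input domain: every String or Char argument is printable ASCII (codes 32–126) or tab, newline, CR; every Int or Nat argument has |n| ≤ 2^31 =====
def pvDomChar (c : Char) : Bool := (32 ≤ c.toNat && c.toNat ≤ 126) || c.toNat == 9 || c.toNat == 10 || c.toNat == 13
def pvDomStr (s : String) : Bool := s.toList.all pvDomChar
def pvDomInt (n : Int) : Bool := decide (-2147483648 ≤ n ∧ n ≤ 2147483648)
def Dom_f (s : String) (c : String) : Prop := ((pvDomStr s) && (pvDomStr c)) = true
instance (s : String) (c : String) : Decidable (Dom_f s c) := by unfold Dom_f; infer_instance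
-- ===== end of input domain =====

-- B scans the string backward and breaks at the first mismatch instead of A's full forward
-- scan that resets a counter on every mismatch; return value only, no side effects.

-- ===== PORT A =====
-- forward loop: for each character s[i], t += 1 on match, t = 0 on mismatch
def f (s : String) (c : String) : Int :=
  s.toList.foldl (fun t ch => if String.mk [ch] == c then t + 1 else 0) 0

-- ===== PORT B =====
-- backward scan with early break: count matching characters from the end, stop at first mismatch
def fAltGo (c : String) : List Char → Int
  | [] => 0
  | ch :: rest => if String.mk [ch] == c then 1 + fAltGo c rest else 0

def f_alt (s : String) (c : String) : Int :=
  fAltGo c s.toList.reverse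

-- ===== PRECONDITION & SPEC =====
def Spec_f (s : String) (c : String) (out : Int) : Prop := out = f_alt s c
instance (s : String) (c : String) (out : Int) : Decidable (Spec_f s c out) := by unfold Spec_f; infer_instance

-- ===== CLAIM (what is proved, stated in full; the proofs are below) =====
def Claim_equal_f : Prop := ∀ (s : String) (c : String), Dom_f s c → Spec_f s c (f s c)

-- ===== LEMMAS AND PROOFS =====
theorem pv_key (c : String) (l : List Char) :
    l.foldl (fun t ch => if String.mk [ch] == c then t + 1 else 0) 0 = fAltGo c l.reverse := by
  induction l using List.reverseRecOn with
  | nil => simp [fAltGo]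
  | append_singleton l ch ih =>
      rw [List.foldl_append, List.reverse_append]
      simp only [List.foldl_cons, List.foldl_nil, List.reverse_singleton, List.singleton_append,
        fAltGo]
      rw [ih]
      by_cases h : String.mk [ch] == c <;> simp [h, add_comm]

-- ===== VERDICT (by name: the statement is the Claim_ definition above) =====
theorem f_spec : Claim_equal_f := by
  intro s c _
  unfold Spec_f f f_alt
  exact pv_key c s.toList
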